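-- pv_equiv track=rewrite | github.com/Vidhi-bhutia/Coding-Ninjas-Slayground-Challenge | Day 8 Terms of AP.py | termsOfAP
-- ===== SOURCE A (Python) =====
-- def termsOfAP(x):
--     series = []
--     n = 1
--     while len(series) < x:
--         term = 3 * n + 2
--         if term % 4 != 0:
--             series.append(term)
--         n += 1
--     return series
-- ===== SOURCE B (Python) =====
-- def termsOfAP(x):
--     # Closed form: the kept terms start at 5 and repeat increments +6,+3,+3,
--     # so the i-th (0-based) term is 5 + 12*(i//3) + (0,6,9)[i%3].
--     return [5 + 12 * (i // 3) + (0, 6, 9)[i % 3] for i in range(x)]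
-- ===== Notes on version B (the rewrite author's own statement) =====
-- stated objective: faster
-- what changed: Replaces the generate-and-filter while loop (trial n counter with a divisibility test and conditional append) by a direct index-to-value closed form 5 + 12*(i//3) + (0,6,9)[i%3] over range(x).
import Mathlib
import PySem

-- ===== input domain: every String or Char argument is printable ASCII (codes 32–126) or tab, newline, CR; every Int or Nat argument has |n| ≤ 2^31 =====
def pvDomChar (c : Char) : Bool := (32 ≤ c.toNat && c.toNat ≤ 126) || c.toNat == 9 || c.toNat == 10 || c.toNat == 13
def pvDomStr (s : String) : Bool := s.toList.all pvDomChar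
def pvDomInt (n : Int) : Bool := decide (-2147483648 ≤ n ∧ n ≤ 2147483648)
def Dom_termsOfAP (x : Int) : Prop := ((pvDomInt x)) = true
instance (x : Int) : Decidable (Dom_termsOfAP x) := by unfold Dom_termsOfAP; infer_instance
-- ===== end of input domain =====

-- B computes each term by the closed form 5 + 12*(i//3) + (0,6,9)[i%3] instead of
-- A's generate-and-filter counter loop; the return values are proved equal for every Int input.

-- ===== PORT A =====
-- while len(series) < x: term = 3*n+2; if term % 4 != 0: series.append(term); n += 1
def termsOfAPLoop (x : Int) (series : List Int) (n : Int) : List Int :=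
  if (series.length : Int) < x then
    let term := 3 * n + 2
    if PySem.Int.mod term 4 ≠ 0 then
      termsOfAPLoop x (series ++ [term]) (n + 1)
    else
      termsOfAPLoop x series (n + 1)
  else series
termination_by 2 * (x.toNat - series.length) + (if PySem.Int.mod (3 * n + 2) 4 = 0 then 1 else 0)
decreasing_by
  · rename_i hlt _
    simp only [PySem.Int.mod_eq_emod_of_pos (by norm_num : (0:Int) < 4)] at *
    have hx : series.length < x.toNat := by omega
    simp only [List.length_append, List.length_singleton]
    split <;> omega
  · rename_i hlt hmod
    simp only [PySem.Int.mod_eq_emod_of_pos (by norm_num : (0:Int) < 4)] at *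
    have h1 : (3 * n + 2) % 4 = 0 := by omega
    have h2 : (3 * (n + 1) + 2) % 4 = 3 := by omega
    simp [h1, h2]

def termsOfAP (x : Int) : List Int := termsOfAPLoop x [] 1

-- ===== PORT B =====
def termsOfAP_alt (x : Int) : List Int :=
  (PySem.List.pyRange 0 x 1).map (fun i =>
    5 + 12 * PySem.Int.floordiv i 3 +
      (if PySem.Int.mod i 3 = 0 then 0 else if PySem.Int.mod i 3 = 1 then 6 else 9))

-- ===== PRECONDITION & SPEC =====
def Spec_termsOfAP (x : Int) (out : List Int) : Prop := out = termsOfAP_alt x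
instance (x : Int) (out : List Int) : Decidable (Spec_termsOfAP x out) := by unfold Spec_termsOfAP; infer_instance

-- ===== CLAIM (what is proved, stated in full; the proofs are below) =====
def Claim_equal_termsOfAP : Prop := ∀ (x : Int), Dom_termsOfAP x → Spec_termsOfAP x (termsOfAP x)

-- ===== LEMMAS AND PROOFS =====

-- the i-th kept term, as a function of the 0-based index i
def gN (i : Nat) : Int :=
  5 + 12 * ((i / 3 : Nat) : Int) + (if i % 3 = 0 then 0 else if i % 3 = 1 then 6 else 9)

-- the value of A's counter n when the i-th kept term is produced
def nOf (i : Nat) : Int :=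
  1 + 4 * ((i / 3 : Nat) : Int) + (if i % 3 = 0 then 0 else if i % 3 = 1 then 2 else 3)

theorem term_at_nOf (i : Nat) : 3 * nOf i + 2 = gN i := by
  have h : i % 3 = 0 ∨ i % 3 = 1 ∨ i % 3 = 2 := by omega
  rcases h with h | h | h <;> simp [gN, nOf, h] <;> ring

theorem nOf_kept (i : Nat) : PySem.Int.mod (3 * nOf i + 2) 4 ≠ 0 := by
  rw [PySem.Int.mod_eq_emod_of_pos (by norm_num : (0:Int) < 4)]
  have h : i % 3 = 0 ∨ i % 3 = 1 ∨ i % 3 = 2 := by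
    omega
  rcases h with h | h | h <;> simp only [nOf, h] <;> omega

theorem nOf_succ_of_mod_ne (i : Nat) (h : i % 3 ≠ 0) : nOf i + 1 = nOf (i + 1) := by
  have h' : i % 3 = 1 ∨ i % 3 = 2 := by omega
  rcases h' with h' | h'
  · have e1 : (i + 1) % 3 = 2 := by omega
    have e2 : (i + 1) / 3 = i / 3 := by omega
    simp only [nOf, h', e1, e2]
    norm_num
    omega
  · have e1 : (i + 1) % 3 = 0 := by omega
    have e2 : (i + 1) / 3 = i / 3 + 1 := by omega
    simp only [nOf, h', e1, e2]
    push_cast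
    ring

theorem nOf_succ_of_mod_eq (i : Nat) (h : i % 3 = 0) : nOf i + 2 = nOf (i + 1) := by
  have e1 : (i + 1) % 3 = 1 := by omega
  have e2 : (i + 1) / 3 = i / 3 := by omega
  simp only [nOf, h, e1, e2]
  norm_num

theorem nOf_skip_mod (i : Nat) (h : i % 3 = 0) :
    PySem.Int.mod (3 * (nOf i + 1) + 2) 4 = 0 := by
  rw [PySem.Int.mod_eq_emod_of_pos (by norm_num : (0:Int) < 4)]
  simp only [nOf, h]
  push_cast
  ring_nf
  omega

theorem range_succ_shift (i d : Nat) :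
    (List.range (d + 1)).map (fun j => gN (i + j)) =
      gN i :: (List.range d).map (fun j => gN (i + 1 + j)) := by
  rw [List.range_succ_eq_map, List.map_cons, List.map_map]
  refine congrArg₂ _ (by simp) ?_
  apply List.map_congr_left
  intro j _
  simp only [Function.comp_apply]
  congr 1
  omega

theorem loop_closed_form (x : Int) :
    ∀ (d : Nat) (series : List Int) (i : Nat),
      x.toNat - series.length = d → x ≤ series.length + d →
      termsOfAPLoop x series (nOf i) =
        series ++ (List.range d).map (fun j => gN (i + j)) := by
  intro d
  induction d with
  | zero =>
    intro series i hd hx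
    rw [termsOfAPLoop]
    have h : ¬ ((series.length : Int) < x) := by omega
    simp [h]
  | succ d ih =>
    intro series i hd hx
    have hlt : (series.length : Int) < x := by omega
    rw [termsOfAPLoop, if_pos hlt, if_pos (nOf_kept i),
        show (3 * nOf i + 2) = gN i from term_at_nOf i, range_succ_shift i d]
    by_cases hmod : i % 3 = 0
    · rw [termsOfAPLoop]
      by_cases hc : (((series ++ [gN i]).length : Int) < x)
      · rw [if_pos hc, if_neg (not_not_intro (nOf_skip_mod i hmod)),
            show nOf i + 1 + 1 = nOf (i + 1) by
              rw [← nOf_succ_of_mod_eq i hmod]; ring]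
        rw [ih (series ++ [gN i]) (i + 1) (by simp; omega) (by simp; omega)]
        simp
      · -- the loop stops right after the append: d = 0
        have hd0 : d = 0 := by simp at hc; omega
        rw [if_neg hc]
        simp [hd0]
    · rw [nOf_succ_of_mod_ne i hmod]
      rw [ih (series ++ [gN i]) (i + 1) (by simp; omega) (by simp; omega)]
      simp

theorem alt_body_eq_gN (k : Nat) :
    5 + 12 * PySem.Int.floordiv (k : Int) 3 +
      (if PySem.Int.mod (k : Int) 3 = 0 then 0
       else if PySem.Int.mod (k : Int) 3 = 1 then 6 else 9) = gN k := by
  have hf : PySem.Int.floordiv (k : Int) 3 = ((k / 3 : Nat) : Int) := by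
    exact_mod_cast PySem.Int.floordiv_natCast k 3
  have hm : PySem.Int.mod (k : Int) 3 = ((k % 3 : Nat) : Int) := by
    exact_mod_cast PySem.Int.mod_natCast k 3
  rw [hf, hm, gN]
  have h : k % 3 = 0 ∨ k % 3 = 1 ∨ k % 3 = 2 := by omega
  rcases h with h | h | h <;> simp [h]

theorem alt_eq_map_gN (x : Int) :
    termsOfAP_alt x = (List.range x.toNat).map (fun k => gN k) := by
  unfold termsOfAP_alt
  rw [PySem.List.pyRange_one, List.map_map, sub_zero]
  apply List.map_congr_left
  intro k _
  simp only [Function.comp_apply, zero_add]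
  exact alt_body_eq_gN k

-- ===== VERDICT (by name: the statement is the Claim_ definition above) =====
theorem termsOfAP_spec : Claim_equal_termsOfAP := by
  intro x _
  unfold Spec_termsOfAP termsOfAP
  have h := loop_closed_form x x.toNat [] 0 (by simp) (by omega)
  rw [show (1 : Int) = nOf 0 by simp [nOf], h, alt_eq_map_gN]
  simp
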